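-- pv_equiv track=rewrite | github.com/DanielZaBV/Proyecto_python | Analisis_coloriespaciales/analisis_color.py | agrupar_y_normalizar_colores
-- ===== SOURCE A (Python) =====
-- def agrupar_y_normalizar_colores(colores_rgb, umbral=20):
--     def distancia_rgb(color1, color2):
--         return sum(abs(c1 - c2) for c1, c2 in zip(color1, color2))
--
--     grupos = []
--     colores_normalizados = []
--
--     for color in colores_rgb:
--         agregado = False
--         for grupo in grupos:
--             if all(abs(color[i] - grupo[0][i]) <= umbral for i in range(3)):
--                 grupo.append(color)
--                 agregado = True
--                 break
--         if not agregado: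
--             grupos.append([color])
--
--     for grupo in grupos:
--         r_promedio = int(sum(c[0] for c in grupo) / len(grupo))
--         g_promedio = int(sum(c[1] for c in grupo) / len(grupo))
--         b_promedio = int(sum(c[2] for c in grupo) / len(grupo))
--         colores_normalizados.append((r_promedio, g_promedio, b_promedio))
--
--     return colores_normalizados
-- ===== SOURCE B (Python) =====
-- def agrupar_y_normalizar_colores(colores_rgb, umbral=20):
--     # Grid hash: group representatives are bucketed by their cell (r//u, g//u, b//u)
--     # with cell size umbral; a color can only match a representative in one of the
--     # 27 neighboring cells, and the earliest-created such group is chosen (A's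
--     # first-match order = smallest group index).
--     grupos = []   # per group: [rep, n, sum_r, sum_g, sum_b]
--     grid = {}     # umbral > 0: cell -> list of group indices with rep in that cell
--     exact = {}    # umbral == 0: (r, g, b) -> group index (match = exact equality)
--     for color in colores_rgb:
--         r, g, b = color[0], color[1], color[2]
--         best = -1
--         if umbral > 0:
--             cr, cg, cb = r // umbral, g // umbral, b // umbral
--             for dr in (-1, 0, 1):
--                 for dg in (-1, 0, 1):
--                     for db in (-1, 0, 1):
--                         for j in grid.get((cr + dr, cg + dg, cb + db), ()):
--                             rep = grupos[j][0]
--                             if (abs(r - rep[0]) <= umbral and abs(g - rep[1]) <= umbral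
--                                     and abs(b - rep[2]) <= umbral):
--                                 if best == -1 or j < best:
--                                     best = j
--         elif umbral == 0:
--             best = exact.get((r, g, b), -1)
--         # umbral < 0: |x| <= umbral is impossible, no color ever joins a group
--         if best == -1:
--             j = len(grupos)
--             grupos.append([color, 1, r, g, b])
--             if umbral > 0:
--                 grid.setdefault((r // umbral, g // umbral, b // umbral), []).append(j)
--             elif umbral == 0:
--                 exact[(r, g, b)] = j
--         else:
--             e = grupos[best]
--             e[1] += 1
--             e[2] += r
--             e[3] += g
--             e[4] += b
--     return [(int(sr / n), int(sg / n), int(sb / n)) for _, n, sr, sg, sb in grupos]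
-- ===== Notes on version B (the rewrite author's own statement) =====
-- stated objective: alternative
-- what changed: B replaces A's linear scan of all existing groups per color by a spatial grid hash: group representatives are bucketed by their cell (r//umbral, g//umbral, b//umbral), each color probes only the 27 neighboring cells and joins the earliest-created matching group, with an exact-lookup dict for umbral == 0 and no lookup at all for umbral < 0.
import Mathlib
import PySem

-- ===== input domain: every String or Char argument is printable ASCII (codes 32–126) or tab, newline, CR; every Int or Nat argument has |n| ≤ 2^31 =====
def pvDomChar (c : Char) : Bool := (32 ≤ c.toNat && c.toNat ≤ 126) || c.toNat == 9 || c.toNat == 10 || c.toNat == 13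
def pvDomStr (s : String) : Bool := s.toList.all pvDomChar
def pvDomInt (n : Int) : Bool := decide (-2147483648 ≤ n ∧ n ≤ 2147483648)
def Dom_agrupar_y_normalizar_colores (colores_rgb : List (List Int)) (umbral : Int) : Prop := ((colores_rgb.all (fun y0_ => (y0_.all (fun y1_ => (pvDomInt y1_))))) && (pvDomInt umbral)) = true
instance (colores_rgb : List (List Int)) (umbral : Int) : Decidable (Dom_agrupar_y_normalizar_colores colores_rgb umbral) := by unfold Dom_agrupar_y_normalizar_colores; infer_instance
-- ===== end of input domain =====

-- B replaces A's linear scan over all groups by a spatial grid hash: group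
-- representatives are bucketed by cell (r//u, g//u, b//u) of size umbral, a color
-- only probes the 27 neighboring cells and picks the earliest-created matching
-- group (objective: alternative).
-- Python's int(sum/len) (float division then truncation) is ported as
-- PySem.Int.truncdiv, exact for |sum| < 2^53.

-- ===== PORT A =====
-- all(abs(color[i] - grupo[0][i]) <= umbral for i in range(3))
def pvMatchA (umbral : Int) (color rep : List Int) : Bool :=
  (PySem.List.pyRange 0 3 1).all
    (fun i => decide (|PySem.List.pyGetD color i 0 - PySem.List.pyGetD rep i 0| ≤ umbral))

-- the inner 'for grupo in grupos: … break': first matching group gets color appended; none = no match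
def pvTryAddA (umbral : Int) (color : List Int) :
    List (List (List Int)) → Option (List (List (List Int)))
  | [] => none
  | g :: gs =>
      if pvMatchA umbral color (PySem.List.pyGetD g 0 []) then some ((g ++ [color]) :: gs)
      else (pvTryAddA umbral color gs).map (g :: ·)

-- one iteration of A's first loop
def pvStepA (umbral : Int) (gs : List (List (List Int))) (color : List Int) :
    List (List (List Int)) :=
  match pvTryAddA umbral color gs with
  | some gs' => gs'
  | none => gs ++ [[color]]

-- the second pass: int(sum(c[k] for c in grupo) / len(grupo)) for k = 0,1,2
def pvPromA (g : List (List Int)) : List Int :=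
  [ PySem.Int.truncdiv ((g.map (fun c => PySem.List.pyGetD c 0 0)).sum) (PySem.List.len g),
    PySem.Int.truncdiv ((g.map (fun c => PySem.List.pyGetD c 1 0)).sum) (PySem.List.len g),
    PySem.Int.truncdiv ((g.map (fun c => PySem.List.pyGetD c 2 0)).sum) (PySem.List.len g) ]

def agrupar_y_normalizar_colores (colores_rgb : List (List Int)) (umbral : Int) : List (List Int) :=
  (colores_rgb.foldl (pvStepA umbral) []).map pvPromA

-- ===== PORT B =====
-- group entry: (rep, count, sum_r, sum_g, sum_b)
abbrev pvE := List Int × Int × Int × Int × Int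
-- grid / exact key: an Int triple
abbrev pvK := Int × Int × Int

-- abs(r - rep[0]) <= umbral and abs(g - rep[1]) <= umbral and abs(b - rep[2]) <= umbral
def pvMatchB (u r g b : Int) (rep : List Int) : Bool :=
  decide (|r - PySem.List.pyGetD rep 0 0| ≤ u) &&
  decide (|g - PySem.List.pyGetD rep 1 0| ≤ u) &&
  decide (|b - PySem.List.pyGetD rep 2 0| ≤ u)

-- the j-loop over one cell's index list (grupos[j] is always a valid index: every
-- index stored in the grid points at an existing group, so pyGetD's default is dead)
def pvUpdBest (grupos : List pvE) (u r g b : Int) (best j : Int) : Int :=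
  if pvMatchB u r g b (PySem.List.pyGetD grupos j ([], 0, 0, 0, 0)).1 then
    (if best == -1 || j < best then j else best)
  else best

def pvOffs : List Int := [-1, 0, 1]

-- the three nested dr/dg/db loops probing the 27 neighbor cells
def pvBest27 (grupos : List pvE) (grid : PySem.Dict pvK (List Int))
    (u r g b cr cg cb : Int) : Int :=
  pvOffs.foldl (fun best dr =>
    pvOffs.foldl (fun best dg =>
      pvOffs.foldl (fun best db =>
        (grid.getD (cr + dr, cg + dg, cb + db) []).foldl (pvUpdBest grupos u r g b) best)
        best) best) (-1)

-- best group index for this color: grid probe (u > 0), exact lookup (u = 0), none (u < 0)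
def pvBestB (grupos : List pvE) (grid : PySem.Dict pvK (List Int))
    (exact : PySem.Dict pvK Int) (u r g b : Int) : Int :=
  if 0 < u then
    pvBest27 grupos grid u r g b
      (PySem.Int.floordiv r u) (PySem.Int.floordiv g u) (PySem.Int.floordiv b u)
  else if u = 0 then exact.getD (r, g, b) (-1)
  else -1

-- in-place update grupos[i] (Python's e[1] += 1; e[2] += r; …)
def pvSetAt {α : Type} : List α → Nat → (α → α) → List α
  | [], _, _ => []
  | a :: l, 0, f => f a :: l
  | a :: l, n + 1, f => a :: pvSetAt l n f

-- one iteration of B's loop over colores_rgb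
def pvStepB (u : Int)
    (st : List pvE × PySem.Dict pvK (List Int) × PySem.Dict pvK Int) (color : List Int) :
    List pvE × PySem.Dict pvK (List Int) × PySem.Dict pvK Int :=
  let grupos := st.1
  let grid := st.2.1
  let exact := st.2.2
  let r := PySem.List.pyGetD color 0 0
  let g := PySem.List.pyGetD color 1 0
  let b := PySem.List.pyGetD color 2 0
  let best := pvBestB grupos grid exact u r g b
  if best == -1 then
    (grupos ++ [(color, 1, r, g, b)],
     -- grid.setdefault(cell, []).append(j)
     if 0 < u then
       grid.modify (PySem.Int.floordiv r u, PySem.Int.floordiv g u, PySem.Int.floordiv b u)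
         [] (· ++ [(grupos.length : Int)])
     else grid,
     if u = 0 then exact.insert (r, g, b) (grupos.length : Int) else exact)
  else
    (pvSetAt grupos best.toNat
       (fun e => (e.1, e.2.1 + 1, e.2.2.1 + r, e.2.2.2.1 + g, e.2.2.2.2 + b)),
     grid, exact)

def agrupar_y_normalizar_colores_alt (colores_rgb : List (List Int)) (umbral : Int) : List (List Int) :=
  let st := colores_rgb.foldl (pvStepB umbral) ([], PySem.Dict.empty, PySem.Dict.empty)
  st.1.map (fun e =>
    [ PySem.Int.truncdiv e.2.2.1 e.2.1, PySem.Int.truncdiv e.2.2.2.1 e.2.1,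
      PySem.Int.truncdiv e.2.2.2.2 e.2.1 ])

-- ===== PRECONDITION & SPEC =====
-- Python A raises IndexError when some color has fewer than 3 components (color[i]/c[k]);
-- Pre_ admits exactly the inputs where every color has at least 3 components.
def Pre_agrupar_y_normalizar_colores (colores_rgb : List (List Int)) (umbral : Int) : Prop :=
  ∀ c ∈ colores_rgb, 3 ≤ c.length
instance (colores_rgb : List (List Int)) (umbral : Int) : Decidable (Pre_agrupar_y_normalizar_colores colores_rgb umbral) := by unfold Pre_agrupar_y_normalizar_colores; infer_instance

def pvWitness_agrupar_y_normalizar_colores : List (List Int) × Int :=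
  ([[1, 2, 3], [100, 100, 100], [5, 5, 5]], 20)

def Spec_agrupar_y_normalizar_colores (colores_rgb : List (List Int)) (umbral : Int) (out : List (List Int)) : Prop := out = agrupar_y_normalizar_colores_alt colores_rgb umbral
instance (colores_rgb : List (List Int)) (umbral : Int) (out : List (List Int)) : Decidable (Spec_agrupar_y_normalizar_colores colores_rgb umbral out) := by unfold Spec_agrupar_y_normalizar_colores; infer_instance

-- ===== CLAIM (what is proved, stated in full; the proofs are below) =====
def Claim_equal_agrupar_y_normalizar_colores : Prop := ∀ (colores_rgb : List (List Int)) (umbral : Int), Dom_agrupar_y_normalizar_colores colores_rgb umbral → Pre_agrupar_y_normalizar_colores colores_rgb umbral → Spec_agrupar_y_normalizar_colores colores_rgb umbral (agrupar_y_normalizar_colores colores_rgb umbral)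

-- ===== LEMMAS AND PROOFS =====

-- abstraction: a group of A corresponds to B's entry (rep, count, channel sums)
def pvToE (g : List (List Int)) : pvE :=
  (PySem.List.pyGetD g 0 [], (g.length : Int),
   (g.map (fun c => PySem.List.pyGetD c 0 0)).sum,
   (g.map (fun c => PySem.List.pyGetD c 1 0)).sum,
   (g.map (fun c => PySem.List.pyGetD c 2 0)).sum)

-- representative of A's group number i
def pvRepAt (gs : List (List (List Int))) (i : Nat) : List Int :=
  PySem.List.pyGetD (gs.getD i []) 0 []

-- first 3 channels of a color / its grid cell
def pvChansOf (c : List Int) : pvK :=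
  (PySem.List.pyGetD c 0 0, PySem.List.pyGetD c 1 0, PySem.List.pyGetD c 2 0)
def pvCellOf (u : Int) (c : List Int) : pvK :=
  (PySem.Int.floordiv (PySem.List.pyGetD c 0 0) u,
   PySem.Int.floordiv (PySem.List.pyGetD c 1 0) u,
   PySem.Int.floordiv (PySem.List.pyGetD c 2 0) u)

-- the grid holds exactly the valid group indices, keyed by the cell of the group's rep
def pvGridInv (u : Int) (gs : List (List (List Int))) (grid : PySem.Dict pvK (List Int)) : Prop :=
  (∀ k j, j ∈ grid.getD k [] → ∃ i : Nat, j = (i : Int) ∧ i < gs.length ∧ pvCellOf u (pvRepAt gs i) = k) ∧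
  (∀ i : Nat, i < gs.length → (i : Int) ∈ grid.getD (pvCellOf u (pvRepAt gs i)) [])

-- the exact dict maps each rep's channel triple to its (unique) group index
def pvExInv (gs : List (List (List Int))) (exact : PySem.Dict pvK Int) : Prop :=
  (∀ k j, exact.get? k = some j → ∃ i : Nat, j = (i : Int) ∧ i < gs.length ∧ pvChansOf (pvRepAt gs i) = k) ∧
  (∀ i : Nat, i < gs.length → exact.get? (pvChansOf (pvRepAt gs i)) = some (i : Int))

def pvInv (u : Int) (gs : List (List (List Int)))
    (grid : PySem.Dict pvK (List Int)) (exact : PySem.Dict pvK Int) : Prop :=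
  (∀ g ∈ gs, g ≠ []) ∧ (0 < u → pvGridInv u gs grid) ∧ (u = 0 → pvExInv gs exact)

theorem pvMatch_eq (u : Int) (c rep : List Int) :
    pvMatchB u (PySem.List.pyGetD c 0 0) (PySem.List.pyGetD c 1 0) (PySem.List.pyGetD c 2 0) rep
      = pvMatchA u c rep := by
  simp [pvMatchA, pvMatchB, show PySem.List.pyRange 0 3 1 = [0, 1, 2] from rfl, Bool.and_assoc]

-- A's scan picks the first matching group
theorem pvTryAddA_eq_findIdx (u : Int) (c : List Int) (gs : List (List (List Int))) :
    pvTryAddA u c gs =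
      (gs.findIdx? (fun g => pvMatchA u c (PySem.List.pyGetD g 0 []))).map
        (fun i => pvSetAt gs i (· ++ [c])) := by
  induction gs with
  | nil => rfl
  | cons g tl ih =>
      simp only [pvTryAddA, List.findIdx?_cons]
      split_ifs with hm
      · simp [pvSetAt]
      · rw [ih]
        cases tl.findIdx? (fun g => pvMatchA u c (PySem.List.pyGetD g 0 [])) <;> simp [pvSetAt]

-- cells of two channels within umbral are neighbors
theorem pvFdiv_close (u c x : Int) (hu : 0 < u) (h : |c - x| ≤ u) :
    PySem.Int.floordiv c u - 1 ≤ PySem.Int.floordiv x u ∧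
      PySem.Int.floordiv x u ≤ PySem.Int.floordiv c u + 1 := by
  rw [PySem.Int.floordiv_eq_ediv_of_pos hu, PySem.Int.floordiv_eq_ediv_of_pos hu]
  have hc := Int.mul_ediv_add_emod c u
  have hx := Int.mul_ediv_add_emod x u
  have h1 := Int.emod_nonneg c (ne_of_gt hu)
  have h2 := Int.emod_lt_of_pos c hu
  have h3 := Int.emod_nonneg x (ne_of_gt hu)
  have h4 := Int.emod_lt_of_pos x hu
  have habs := abs_le.mp h
  exact ⟨by nlinarith [habs.1, habs.2], by nlinarith [habs.1, habs.2]⟩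

-- match is impossible for a negative threshold
theorem pvMatchA_neg (u : Int) (c rep : List Int) (hu : u < 0) : pvMatchA u c rep = false := by
  rw [← pvMatch_eq]
  simp only [pvMatchB, Bool.and_eq_false_iff, decide_eq_false_iff_not, not_le]
  have := abs_nonneg (PySem.List.pyGetD c 0 0 - PySem.List.pyGetD rep 0 0)
  left; omega

-- match at threshold 0 is exact equality of the first three channels
theorem pvMatchA_zero (c rep : List Int) :
    pvMatchA 0 c rep = true ↔ pvChansOf c = pvChansOf rep := by
  rw [← pvMatch_eq]
  simp only [pvMatchB, pvChansOf, Bool.and_eq_true, decide_eq_true_eq, Prod.mk.injEq]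
  constructor
  · rintro ⟨⟨h1, h2⟩, h3⟩
    refine ⟨?_, ?_, ?_⟩ <;> [skip; skip; skip] <;>
      first
        | (have := abs_le.mp h1; omega)
        | (have := abs_le.mp h2; omega)
        | (have := abs_le.mp h3; omega)
  · rintro ⟨h1, h2, h3⟩
    simp [h1, h2, h3]

-- match extracted channelwise
theorem pvMatchA_le (u : Int) (c rep : List Int) (h : pvMatchA u c rep = true) :
    |PySem.List.pyGetD c 0 0 - PySem.List.pyGetD rep 0 0| ≤ u ∧
    |PySem.List.pyGetD c 1 0 - PySem.List.pyGetD rep 1 0| ≤ u ∧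
    |PySem.List.pyGetD c 2 0 - PySem.List.pyGetD rep 2 0| ≤ u := by
  rw [← pvMatch_eq] at h
  simp only [pvMatchB, Bool.and_eq_true, decide_eq_true_eq] at h
  exact ⟨h.1.1, h.1.2, h.2⟩

-- pvSetAt basic facts
theorem pvSetAt_length {α : Type} (l : List α) (i : Nat) (f : α → α) :
    (pvSetAt l i f).length = l.length := by
  induction l generalizing i with
  | nil => rfl
  | cons a tl ih => cases i with
    | zero => rfl
    | succ n => simpa [pvSetAt] using ih n

theorem pvSetAt_getD {α : Type} (l : List α) (i : Nat) (f : α → α) (n : Nat) (d : α) :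
    (pvSetAt l i f).getD n d =
      if n = i ∧ i < l.length then f (l.getD i d) else l.getD n d := by
  induction l generalizing i n with
  | nil => simp [pvSetAt]
  | cons a tl ih =>
      cases i with
      | zero => cases n <;> simp [pvSetAt]
      | succ m =>
          cases n with
          | zero => simp [pvSetAt]
          | succ k =>
              simp only [pvSetAt, List.getD_cons_succ, List.length_cons, ih m k]
              by_cases h : k = m ∧ m < tl.length
              · rw [if_pos h, if_pos (by omega)]
              · rw [if_neg h, if_neg (by omega)]

theorem pvSetAt_mem {α : Type} (l : List α) (i : Nat) (f : α → α) (x : α)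
    (hx : x ∈ pvSetAt l i f) : x ∈ l ∨ ∃ y ∈ l, x = f y := by
  induction l generalizing i with
  | nil => simp [pvSetAt] at hx
  | cons a tl ih =>
      cases i with
      | zero =>
          rcases List.mem_cons.mp hx with rfl | hx
          · exact Or.inr ⟨a, by simp, rfl⟩
          · exact Or.inl (by simp [hx])
      | succ m =>
          rcases List.mem_cons.mp hx with rfl | hx
          · exact Or.inl (by simp)
          · rcases ih m hx with h | ⟨y, hy, rfl⟩
            · exact Or.inl (by simp [h])
            · exact Or.inr ⟨y, by simp [hy], rfl⟩

-- commute pvSetAt with map when the update commutes at the touched element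
theorem pvSetAt_map {α β : Type} (l : List α) (i : Nat) (h : α → β) (f : β → β) (g : α → α)
    (hfg : ∀ x ∈ l, f (h x) = h (g x)) :
    pvSetAt (l.map h) i f = (pvSetAt l i g).map h := by
  induction l generalizing i with
  | nil => rfl
  | cons a tl ih =>
      cases i with
      | zero => simp [pvSetAt, hfg a (by simp)]
      | succ m =>
          simp only [List.map_cons, pvSetAt, List.map_cons, List.cons.injEq, true_and]
          exact ih m (fun x hx => hfg x (by simp [hx]))

-- pvToE facts
theorem pvToE_single (c : List Int) :
    pvToE [c] = (c, 1, PySem.List.pyGetD c 0 0, PySem.List.pyGetD c 1 0, PySem.List.pyGetD c 2 0) := by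
  simp [pvToE]

theorem pvToE_append (g : List (List Int)) (c : List Int) (h : g ≠ []) :
    pvToE (g ++ [c]) =
      ((pvToE g).1, (pvToE g).2.1 + 1, (pvToE g).2.2.1 + PySem.List.pyGetD c 0 0,
       (pvToE g).2.2.2.1 + PySem.List.pyGetD c 1 0, (pvToE g).2.2.2.2 + PySem.List.pyGetD c 2 0) := by
  cases g with
  | nil => exact absurd rfl h
  | cons x xs =>
      simp [pvToE, PySem.List.pyGetD_zero]
      ring_nf
      exact ⟨trivial, trivial, trivial⟩

-- the generic best-update step of B's inner scan
def pvMinStep (q : Int → Bool) (best j : Int) : Int :=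
  if q j then (if best == -1 || j < best then j else best) else best

theorem pvUpdBest_eq (grupos : List pvE) (u r g b : Int) :
    pvUpdBest grupos u r g b =
      pvMinStep (fun j => pvMatchB u r g b (PySem.List.pyGetD grupos j ([], 0, 0, 0, 0)).1) := rfl

-- B's scan computes the minimum matching candidate (with -1 for "none")
theorem pvMinFold_spec (q : Int → Bool) (js : List Int) (hjs : ∀ j ∈ js, 0 ≤ j) :
    ∀ b0 : Int, (b0 = -1 ∨ (0 ≤ b0 ∧ q b0 = true)) →
      (js.foldl (pvMinStep q) b0 = b0 ∨
        (js.foldl (pvMinStep q) b0 ∈ js ∧ q (js.foldl (pvMinStep q) b0) = true)) ∧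
      (b0 ≠ -1 → js.foldl (pvMinStep q) b0 ≤ b0) ∧
      (∀ j ∈ js, q j = true → js.foldl (pvMinStep q) b0 ≠ -1 ∧ js.foldl (pvMinStep q) b0 ≤ j) := by
  induction js with
  | nil => intro b0 hb0; simp
  | cons j tl ih =>
      intro b0 hb0
      have hj : 0 ≤ j := hjs j (by simp)
      have htl : ∀ x ∈ tl, 0 ≤ x := fun x hx => hjs x (by simp [hx])
      simp only [List.foldl_cons]
      set b1 := pvMinStep q b0 j with hb1def
      have hb1cases : (b1 = b0 ∧ q j = false) ∨
          (b1 = j ∧ q j = true ∧ (b0 = -1 ∨ j < b0)) ∨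
          (b1 = b0 ∧ q j = true ∧ b0 ≠ -1 ∧ b0 ≤ j) := by
        by_cases hq : q j = true
        · by_cases hc : b0 = -1 ∨ j < b0
          · refine Or.inr (Or.inl ⟨?_, hq, hc⟩)
            rw [hb1def]; unfold pvMinStep
            rw [if_pos hq, if_pos (by rcases hc with hc | hc <;> simp [hc])]
          · rw [not_or, not_lt] at hc
            obtain ⟨hc1, hc2⟩ := hc
            refine Or.inr (Or.inr ⟨?_, hq, hc1, hc2⟩)
            rw [hb1def]; unfold pvMinStep
            have hnc : ¬((b0 == -1 || decide (j < b0)) = true) := by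
              simp only [Bool.or_eq_true, beq_iff_eq, decide_eq_true_eq]; omega
            rw [if_pos hq, if_neg hnc]
        · refine Or.inl ⟨?_, Bool.not_eq_true _ ▸ eq_false_of_ne_true hq⟩
          rw [hb1def]; unfold pvMinStep; rw [if_neg hq]
      have hb1 : b1 = -1 ∨ (0 ≤ b1 ∧ q b1 = true) := by
        rcases hb1cases with ⟨h1, _⟩ | ⟨h1, h2, _⟩ | ⟨h1, _, h3, _⟩
        · rw [h1]; exact hb0
        · exact Or.inr ⟨h1 ▸ hj, h1 ▸ h2⟩
        · rcases hb0 with h | h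
          · exact absurd h (h1 ▸ h3)
          · exact Or.inr (h1 ▸ h)
      obtain ⟨ih1, ih2, ih3⟩ := ih htl b1 hb1
      have hb1le : b0 ≠ -1 → b1 ≤ b0 := by
        intro hne
        rcases hb1cases with ⟨h1, _⟩ | ⟨h1, _, hc⟩ | ⟨h1, _, _, _⟩ <;> omega
      refine ⟨?_, ?_, ?_⟩
      · rcases ih1 with h | h
        · rcases hb1cases with ⟨h1, _⟩ | ⟨h1, h2, _⟩ | ⟨h1, _⟩
          · exact Or.inl (h.trans h1)
          · exact Or.inr ⟨by rw [h, h1]; exact List.mem_cons_self .., by rw [h, h1]; exact h2⟩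
          · exact Or.inl (h.trans h1)
        · exact Or.inr ⟨List.mem_cons_of_mem _ h.1, h.2⟩
      · intro hne
        have hb1ne : b1 ≠ -1 := by
          rcases hb1cases with ⟨h1, _⟩ | ⟨h1, _⟩ | ⟨h1, _⟩ <;> omega
        exact le_trans (ih2 hb1ne) (hb1le hne)
      · intro x hx hqx
        rcases List.mem_cons.mp hx with rfl | hx
        · have hb1ne : b1 ≠ -1 := by
            rcases hb1cases with ⟨_, h2⟩ | ⟨h1, _⟩ | ⟨h1, _, h3, _⟩
            · rw [hqx] at h2; cases h2
            · omega
            · omega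
          have hb1lex : b1 ≤ x := by
            rcases hb1cases with ⟨_, h2⟩ | ⟨h1, _⟩ | ⟨h1, _, _, h4⟩
            · rw [hqx] at h2; cases h2
            · omega
            · omega
          have hfoldle := ih2 hb1ne
          refine ⟨?_, le_trans hfoldle hb1lex⟩
          rcases ih1 with h | h
          · rw [h]; exact hb1ne
          · have := htl _ h.1; omega
        · exact ih3 x hx hqx

-- the 27 neighbor cells probed by B
def pvKeys27 (cr cg cb : Int) : List pvK :=
  pvOffs.flatMap (fun dr => pvOffs.flatMap (fun dg => pvOffs.map (fun db => (cr + dr, cg + dg, cb + db))))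

theorem pvBest27_eq_fold (grupos : List pvE) (grid : PySem.Dict pvK (List Int))
    (u r g b cr cg cb : Int) :
    pvBest27 grupos grid u r g b cr cg cb =
      ((pvKeys27 cr cg cb).flatMap (fun k => grid.getD k [])).foldl
        (pvUpdBest grupos u r g b) (-1) := by
  simp [pvBest27, pvKeys27, List.foldl_flatMap, List.foldl_map]

theorem pvKeys27_mem (cr cg cb x y z : Int) (hx : cr - 1 ≤ x ∧ x ≤ cr + 1)
    (hy : cg - 1 ≤ y ∧ y ≤ cg + 1) (hz : cb - 1 ≤ z ∧ z ≤ cb + 1) :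
    (x, y, z) ∈ pvKeys27 cr cg cb := by
  simp only [pvKeys27, pvOffs, List.mem_flatMap, List.mem_map, List.mem_cons,
    List.not_mem_nil, or_false, Prod.mk.injEq]
  refine ⟨x - cr, by omega, y - cg, by omega, z - cb, by omega, by ring, by ring, by ring⟩

-- B's per-candidate test agrees with A's match on valid indices
theorem pvQ_coe (u : Int) (color : List Int) (gs : List (List (List Int))) (i : Nat)
    (h : i < gs.length) :
    pvMatchB u (PySem.List.pyGetD color 0 0) (PySem.List.pyGetD color 1 0)
        (PySem.List.pyGetD color 2 0)
        (PySem.List.pyGetD (gs.map pvToE) ((i : Int)) ([], 0, 0, 0, 0)).1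
      = pvMatchA u color (pvRepAt gs i) := by
  rw [PySem.List.pyGetD_natCast,
    List.getD_eq_getElem _ _ (by simpa using h)]
  have : ((gs.map pvToE)[i]'(by simpa using h)).1 = pvRepAt gs i := by
    unfold pvRepAt
    rw [List.getD_eq_getElem _ _ h]
    simp [pvToE]
  rw [this, pvMatch_eq]

-- B's best group index = A's first matching group index
theorem pvBestB_eq (u : Int) (color : List Int) (gs : List (List (List Int)))
    (grid : PySem.Dict pvK (List Int)) (ex : PySem.Dict pvK Int)
    (inv : pvInv u gs grid ex) :
    pvBestB (gs.map pvToE) grid ex u (PySem.List.pyGetD color 0 0)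
        (PySem.List.pyGetD color 1 0) (PySem.List.pyGetD color 2 0)
      = (match gs.findIdx? (fun g => pvMatchA u color (PySem.List.pyGetD g 0 [])) with
         | none => -1
         | some i => (i : Int)) := by
  obtain ⟨hne, hgrid, hex⟩ := inv
  set r := PySem.List.pyGetD color 0 0 with hr
  set g := PySem.List.pyGetD color 1 0 with hg
  set b := PySem.List.pyGetD color 2 0 with hb
  set p := fun gr => pvMatchA u color (PySem.List.pyGetD gr 0 []) with hp
  have hrep : ∀ i : Nat, i < gs.length → p (gs.getD i []) = pvMatchA u color (pvRepAt gs i) := by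
    intro i hi; rw [hp]; rfl
  by_cases hu : 0 < u
  · -- grid probe
    obtain ⟨hg1, hg2⟩ := hgrid hu
    rw [pvBestB, if_pos hu, pvBest27_eq_fold, pvUpdBest_eq]
    set q := fun j => pvMatchB u r g b (PySem.List.pyGetD (gs.map pvToE) j ([], 0, 0, 0, 0)).1 with hq
    set js := ((pvKeys27 (PySem.Int.floordiv r u) (PySem.Int.floordiv g u)
        (PySem.Int.floordiv b u)).flatMap (fun k => grid.getD k [])) with hjs
    have hmem : ∀ j ∈ js, ∃ i : Nat, j = (i : Int) ∧ i < gs.length ∧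
        pvCellOf u (pvRepAt gs i) ∈ pvKeys27 (PySem.Int.floordiv r u)
          (PySem.Int.floordiv g u) (PySem.Int.floordiv b u) := by
      intro j hj
      rw [hjs] at hj
      obtain ⟨k, hk, hjk⟩ := List.mem_flatMap.mp hj
      obtain ⟨i, rfl, hi, hcell⟩ := hg1 k j hjk
      exact ⟨i, rfl, hi, hcell ▸ hk⟩
    have hnn : ∀ j ∈ js, 0 ≤ j := by
      intro j hj; obtain ⟨i, rfl, _, _⟩ := hmem j hj; positivity
    obtain ⟨c1, _, c3⟩ := pvMinFold_spec q js hnn (-1) (Or.inl rfl)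
    -- every matching group index is a candidate
    have hcand : ∀ i : Nat, i < gs.length → p (gs.getD i []) = true → (i : Int) ∈ js := by
      intro i hi hpi
      rw [hrep i hi] at hpi
      obtain ⟨e1, e2, e3⟩ := pvMatchA_le u color (pvRepAt gs i) hpi
      have k1 := pvFdiv_close u r (PySem.List.pyGetD (pvRepAt gs i) 0 0) hu e1
      have k2 := pvFdiv_close u g (PySem.List.pyGetD (pvRepAt gs i) 1 0) hu e2
      have k3 := pvFdiv_close u b (PySem.List.pyGetD (pvRepAt gs i) 2 0) hu e3
      rw [hjs]
      refine List.mem_flatMap.mpr ⟨pvCellOf u (pvRepAt gs i), ?_, hg2 i hi⟩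
      exact pvKeys27_mem _ _ _ _ _ _ ⟨k1.1, k1.2⟩ ⟨k2.1, k2.2⟩ ⟨k3.1, k3.2⟩
    cases hfi : gs.findIdx? p with
    | none =>
        have hnomatch := List.findIdx?_eq_none_iff.mp hfi
        have hqf : ∀ j ∈ js, q j = false := by
          intro j hj
          obtain ⟨i, rfl, hi, _⟩ := hmem j hj
          rw [hq]
          simp only
          rw [pvQ_coe u color gs i hi, ← hrep i hi]
          have hmem' : gs.getD i [] ∈ gs := by
            rw [List.getD_eq_getElem _ _ hi]; exact List.getElem_mem hi
          exact hnomatch _ hmem'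
        rcases c1 with h | h
        · exact h
        · rw [hqf _ h.1] at h; cases h.2
    | some i0 =>
        obtain ⟨hi0, hp0, hmin⟩ := List.findIdx?_eq_some_iff_getElem.mp hfi
        have hp0' : p (gs.getD i0 []) = true := by
          rwa [List.getD_eq_getElem _ _ hi0]
        have hin : (i0 : Int) ∈ js := hcand i0 hi0 hp0'
        have hq0 : q (i0 : Int) = true := by
          rw [hq]; simp only
          rw [pvQ_coe u color gs i0 hi0, ← hrep i0 hi0]
          exact hp0'
        obtain ⟨hne1, hle⟩ := c3 (i0 : Int) hin hq0
        rcases c1 with h | h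
        · exact absurd h hne1
        · obtain ⟨i', heq, hi', _⟩ := hmem _ h.1
          have h2 := h.2
          rw [heq] at h2 hle ⊢
          have hqi' : pvMatchA u color (pvRepAt gs i') = true := by
            rw [hq] at h2
            simp only at h2
            rwa [pvQ_coe u color gs i' hi'] at h2
          have : i0 ≤ i' := by
            by_contra hlt
            have hm := hmin i' (by omega)
            rw [← List.getD_eq_getElem _ _ hi', hrep i' hi'] at hm
            exact hm hqi'
          show (i' : Int) = (i0 : Int)
          omega
  · rw [pvBestB, if_neg hu]
    by_cases hz : u = 0
    · -- exact lookup
      obtain ⟨he1, he2⟩ := hex hz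
      rw [if_pos hz]
      have hchan : (r, g, b) = pvChansOf color := rfl
      have hpz : ∀ i : Nat, i < gs.length →
          (p (gs.getD i []) = true ↔ pvChansOf color = pvChansOf (pvRepAt gs i)) := by
        intro i hi
        rw [hrep i hi, hz]
        exact pvMatchA_zero color _
      cases hget : ex.get? (r, g, b) with
      | none =>
          have hfi : gs.findIdx? p = none := by
            rw [List.findIdx?_eq_none_iff]
            intro x hx
            obtain ⟨i, hi, rfl⟩ := List.mem_iff_getElem.mp hx
            by_contra hcon
            rw [Bool.not_eq_false, ← List.getD_eq_getElem _ _ hi] at hcon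
            have hmz := (hpz i hi).mp hcon
            have := he2 i hi
            rw [← hmz, ← hchan, hget] at this
            cases this
          rw [hfi]
          simp [PySem.Dict.getD_eq_get?_getD, hget]
      | some j =>
          obtain ⟨i, rfl, hi, hchi⟩ := he1 _ _ hget
          have hfi : gs.findIdx? p = some i := by
            rw [List.findIdx?_eq_some_iff_getElem]
            refine ⟨hi, ?_, ?_⟩
            · rw [← List.getD_eq_getElem _ _ hi]
              exact (hpz i hi).mpr (by rw [hchi, hchan])
            · intro k hk hcon
              rw [← List.getD_eq_getElem _ _ (by omega : k < gs.length)] at hcon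
              have hmz := (hpz k (by omega)).mp hcon
              have := he2 k (by omega)
              rw [← hmz, ← hchan, hget] at this
              injection this with hki
              omega
          rw [hfi]
          simp [PySem.Dict.getD_eq_get?_getD, hget]
    · -- u < 0: nothing matches
      rw [if_neg hz]
      have hfi : gs.findIdx? p = none := by
        rw [List.findIdx?_eq_none_iff]
        intro x hx
        exact pvMatchA_neg u color _ (by omega)
      rw [hfi]

-- pvRepAt transport lemmas
theorem pvRepAt_append_lt (gs : List (List (List Int))) (c : List (List Int)) (i : Nat)
    (hi : i < gs.length) : pvRepAt (gs ++ [c]) i = pvRepAt gs i := by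
  unfold pvRepAt
  rw [List.getD_eq_getElem _ _ (by simp; omega), List.getD_eq_getElem _ _ hi,
    List.getElem_append_left hi]

theorem pvRepAt_append_len (gs : List (List (List Int))) (c : List Int) :
    pvRepAt (gs ++ [[c]]) gs.length = c := by
  unfold pvRepAt
  rw [List.getD_eq_getElem _ _ (by simp)]
  simp [PySem.List.pyGetD_zero_cons]

theorem pvRepAt_setAt (gs : List (List (List Int))) (c : List Int) (i0 : Nat)
    (hne : ∀ g ∈ gs, g ≠ []) (i : Nat) :
    pvRepAt (pvSetAt gs i0 (· ++ [c])) i = pvRepAt gs i := by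
  unfold pvRepAt
  rw [pvSetAt_getD]
  by_cases h : i = i0 ∧ i0 < gs.length
  · rw [if_pos h]
    obtain ⟨rfl, hlt⟩ := h
    have hmem : gs.getD i [] ∈ gs := by
      rw [List.getD_eq_getElem _ _ hlt]; exact List.getElem_mem hlt
    cases hg : gs.getD i [] with
    | nil => exact absurd hg (hne _ hmem)
    | cons x xs => simp [PySem.List.pyGetD_zero_cons]
  · rw [if_neg h]

-- invariants depend only on length and representatives
theorem pvGridInv_of_eq (u : Int) (gs gs' : List (List (List Int)))
    (grid : PySem.Dict pvK (List Int)) (hlen : gs'.length = gs.length)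
    (hrep : ∀ i : Nat, i < gs.length → pvRepAt gs' i = pvRepAt gs i)
    (h : pvGridInv u gs grid) : pvGridInv u gs' grid := by
  obtain ⟨h1, h2⟩ := h
  constructor
  · intro k j hj
    obtain ⟨i, rfl, hi, hc⟩ := h1 k j hj
    exact ⟨i, rfl, by omega, by rw [hrep i hi]; exact hc⟩
  · intro i hi
    rw [hrep i (by omega)]
    exact h2 i (by omega)

theorem pvExInv_of_eq (gs gs' : List (List (List Int))) (ex : PySem.Dict pvK Int)
    (hlen : gs'.length = gs.length)
    (hrep : ∀ i : Nat, i < gs.length → pvRepAt gs' i = pvRepAt gs i)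
    (h : pvExInv gs ex) : pvExInv gs' ex := by
  obtain ⟨h1, h2⟩ := h
  constructor
  · intro k j hj
    obtain ⟨i, rfl, hi, hc⟩ := h1 k j hj
    exact ⟨i, rfl, by omega, by rw [hrep i hi]; exact hc⟩
  · intro i hi
    rw [hrep i (by omega)]
    exact h2 i (by omega)

-- one step of B simulates one step of A and preserves the invariant
theorem pvStep_sim (u : Int) (color : List Int) (gs : List (List (List Int)))
    (grid : PySem.Dict pvK (List Int)) (ex : PySem.Dict pvK Int)
    (inv : pvInv u gs grid ex) :
    (pvStepB u (gs.map pvToE, grid, ex) color).1 = (pvStepA u gs color).map pvToE ∧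
    pvInv u (pvStepA u gs color) (pvStepB u (gs.map pvToE, grid, ex) color).2.1
      (pvStepB u (gs.map pvToE, grid, ex) color).2.2 := by
  obtain ⟨hne, hgrid, hex⟩ := inv
  set r := PySem.List.pyGetD color 0 0 with hr
  set g := PySem.List.pyGetD color 1 0 with hg
  set b := PySem.List.pyGetD color 2 0 with hb
  set p := fun gr => pvMatchA u color (PySem.List.pyGetD gr 0 []) with hp
  have hbest := pvBestB_eq u color gs grid ex ⟨hne, hgrid, hex⟩
  rw [pvStepA, pvTryAddA_eq_findIdx]
  cases hfi : gs.findIdx? p with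
  | none =>
      rw [hfi] at hbest
      simp only at hbest
      simp only [Option.map_none]
      have hstep : pvStepB u (gs.map pvToE, grid, ex) color =
          ((gs.map pvToE) ++ [(color, 1, r, g, b)],
           (if 0 < u then
              grid.modify (PySem.Int.floordiv r u, PySem.Int.floordiv g u, PySem.Int.floordiv b u)
                [] (· ++ [((gs.map pvToE).length : Int)])
            else grid),
           (if u = 0 then ex.insert (r, g, b) ((gs.map pvToE).length : Int) else ex)) := by
        rw [pvStepB]
        simp only [hbest]
        rw [if_pos (by rfl)]
      rw [hstep]
      have hnomatch := List.findIdx?_eq_none_iff.mp hfi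
      refine ⟨?_, ?_, ?_, ?_⟩
      · simp [pvToE_single, hr, hg, hb]
      · -- nonempty
        intro x hx
        rcases List.mem_append.mp hx with h | h
        · exact hne x h
        · simp only [List.mem_singleton] at h
          subst h; simp
      · -- grid invariant
        intro hu
        rw [if_pos hu]
        obtain ⟨h1, h2⟩ := hgrid hu
        have hcellc : pvCellOf u color =
            (PySem.Int.floordiv r u, PySem.Int.floordiv g u, PySem.Int.floordiv b u) := rfl
        have hlen : (gs ++ [[color]]).length = gs.length + 1 := by simp
        have hgetD : ∀ k : pvK,
            (grid.modify (PySem.Int.floordiv r u, PySem.Int.floordiv g u, PySem.Int.floordiv b u)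
              [] (· ++ [((gs.map pvToE).length : Int)])).getD k []
            = if k = (PySem.Int.floordiv r u, PySem.Int.floordiv g u, PySem.Int.floordiv b u)
              then grid.getD (PySem.Int.floordiv r u, PySem.Int.floordiv g u, PySem.Int.floordiv b u) [] ++ [(gs.length : Int)]
              else grid.getD k [] := by
          intro k
          rw [PySem.Dict.getD_modify]
          simp
        constructor
        · intro k j hj
          rw [hgetD] at hj
          by_cases hk : k = (PySem.Int.floordiv r u, PySem.Int.floordiv g u, PySem.Int.floordiv b u)
          · rw [if_pos hk] at hj
            rcases List.mem_append.mp hj with h | h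
            · obtain ⟨i, rfl, hi, hc⟩ := h1 _ _ h
              exact ⟨i, rfl, by omega, by rw [pvRepAt_append_lt gs _ i hi]; rw [hc, hk]⟩
            · simp only [List.mem_singleton] at h
              subst h
              exact ⟨gs.length, rfl, by omega, by rw [pvRepAt_append_len, hcellc, hk]⟩
          · rw [if_neg hk] at hj
            obtain ⟨i, rfl, hi, hc⟩ := h1 _ _ hj
            exact ⟨i, rfl, by omega, by rw [pvRepAt_append_lt gs _ i hi]; exact hc⟩
        · intro i hi
          rw [hlen] at hi
          rcases Nat.lt_succ_iff_lt_or_eq.mp hi with hi' | rfl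
          · rw [pvRepAt_append_lt gs _ i hi', hgetD]
            by_cases hk : pvCellOf u (pvRepAt gs i)
                = (PySem.Int.floordiv r u, PySem.Int.floordiv g u, PySem.Int.floordiv b u)
            · rw [if_pos hk]
              exact List.mem_append_left _ (hk ▸ h2 i hi')
            · rw [if_neg hk]
              exact h2 i hi'
          · rw [pvRepAt_append_len, hgetD, hcellc, if_pos rfl]
            exact List.mem_append_right _ (by simp)
      · -- exact invariant
        intro hz
        rw [if_pos hz]
        obtain ⟨h1, h2⟩ := hex hz
        have hchan : pvChansOf color = (r, g, b) := rfl
        have hfresh : ∀ i : Nat, i < gs.length → pvChansOf (pvRepAt gs i) ≠ (r, g, b) := by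
          intro i hi hcon
          have hmemi : gs.getD i [] ∈ gs := by
            rw [List.getD_eq_getElem _ _ hi]; exact List.getElem_mem hi
          have := hnomatch _ hmemi
          rw [hp] at this
          simp only at this
          have hmz : pvMatchA u color (pvRepAt gs i) = true := by
            rw [hz, pvMatchA_zero, hchan, hcon]
          rw [show PySem.List.pyGetD (gs.getD i []) 0 [] = pvRepAt gs i from rfl, hmz] at this
          cases this
        constructor
        · intro k j hj
          rw [PySem.Dict.get?_insert] at hj
          by_cases hk : k = (r, g, b)
          · rw [if_pos hk] at hj
            injection hj with hj
            refine ⟨gs.length, by rw [← hj]; simp, by simp, ?_⟩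
            rw [pvRepAt_append_len, hchan, hk]
          · rw [if_neg hk] at hj
            obtain ⟨i, rfl, hi, hc⟩ := h1 _ _ hj
            exact ⟨i, rfl, by simp; omega, by rw [pvRepAt_append_lt gs _ i hi]; exact hc⟩
        · intro i hi
          simp only [List.length_append, List.length_singleton] at hi
          rcases Nat.lt_succ_iff_lt_or_eq.mp hi with hi' | rfl
          · rw [pvRepAt_append_lt gs _ i hi',
              PySem.Dict.get?_insert_of_ne _ _ (hfresh i hi')]
            exact h2 i hi'
          · rw [pvRepAt_append_len, hchan, PySem.Dict.get?_insert_self]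
            simp
  | some i0 =>
      rw [hfi] at hbest
      simp only at hbest
      simp only [Option.map_some]
      obtain ⟨hi0, _, _⟩ := List.findIdx?_eq_some_iff_getElem.mp hfi
      have hbne : (((i0 : Int)) == (-1 : Int)) = false := by
        have h0 : (0 : Int) ≤ (i0 : Int) := Int.natCast_nonneg i0
        rw [beq_eq_false_iff_ne]
        omega
      have hstep : pvStepB u (gs.map pvToE, grid, ex) color =
          (pvSetAt (gs.map pvToE) i0
            (fun e => (e.1, e.2.1 + 1, e.2.2.1 + r, e.2.2.2.1 + g, e.2.2.2.2 + b)),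
           grid, ex) := by
        rw [pvStepB]
        simp only [hbest]
        rw [if_neg (by rw [hbne]; exact Bool.false_ne_true)]
        rw [← hr, ← hg, ← hb, Int.toNat_natCast]
      rw [hstep]
      have hmap : pvSetAt (gs.map pvToE) i0
            (fun e => (e.1, e.2.1 + 1, e.2.2.1 + r, e.2.2.2.1 + g, e.2.2.2.2 + b))
          = (pvSetAt gs i0 (· ++ [color])).map pvToE := by
        apply pvSetAt_map
        intro x hx
        rw [pvToE_append x color (hne x hx)]
      have hlen := pvSetAt_length gs i0 (· ++ [color])
      have hreps := pvRepAt_setAt gs color i0 hne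
      refine ⟨hmap, ?_, ?_, ?_⟩
      · intro x hx
        rcases pvSetAt_mem _ _ _ _ hx with h | ⟨y, _, rfl⟩
        · exact hne x h
        · simp
      · intro hu
        exact pvGridInv_of_eq u gs _ grid hlen (fun i _ => hreps i) (hgrid hu)
      · intro hz
        exact pvExInv_of_eq gs _ ex hlen (fun i _ => hreps i) (hex hz)

-- the whole loop of B simulates the whole loop of A
theorem pvFold_sim (u : Int) (cs : List (List Int)) (gs : List (List (List Int)))
    (grid : PySem.Dict pvK (List Int)) (ex : PySem.Dict pvK Int)
    (inv : pvInv u gs grid ex) :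
    (cs.foldl (pvStepB u) (gs.map pvToE, grid, ex)).1 = (cs.foldl (pvStepA u) gs).map pvToE := by
  induction cs generalizing gs grid ex with
  | nil => rfl
  | cons c tl ih =>
      simp only [List.foldl_cons]
      obtain ⟨h1, h2⟩ := pvStep_sim u c gs grid ex inv
      have heta : pvStepB u (gs.map pvToE, grid, ex) c
          = ((pvStepB u (gs.map pvToE, grid, ex) c).1,
             (pvStepB u (gs.map pvToE, grid, ex) c).2.1,
             (pvStepB u (gs.map pvToE, grid, ex) c).2.2) := rfl
      rw [heta, h1]
      exact ih _ _ _ h2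

-- averaging a group entry equals averaging the group
theorem pvFinal_eq (g : List (List Int)) :
    (fun e : pvE => [ PySem.Int.truncdiv e.2.2.1 e.2.1, PySem.Int.truncdiv e.2.2.2.1 e.2.1,
      PySem.Int.truncdiv e.2.2.2.2 e.2.1 ]) (pvToE g) = pvPromA g := by
  simp [pvToE, pvPromA, PySem.List.len_eq]

-- the empty state satisfies the invariant
theorem pvInv_empty (u : Int) : pvInv u [] PySem.Dict.empty PySem.Dict.empty := by
  refine ⟨by simp, fun _ => ⟨?_, ?_⟩, fun _ => ⟨?_, ?_⟩⟩
  · intro k j hj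
    rw [PySem.Dict.getD_eq_get?_getD, PySem.Dict.get?_empty] at hj
    cases hj
  · intro i hi; cases hi
  · intro k j hj
    rw [PySem.Dict.get?_empty] at hj
    cases hj
  · intro i hi; cases hi

-- ===== VERDICT (by name: the statement is the Claim_ definition above) =====
theorem agrupar_y_normalizar_colores_spec : Claim_equal_agrupar_y_normalizar_colores := by
  intro cs u _ _
  unfold Spec_agrupar_y_normalizar_colores
  unfold agrupar_y_normalizar_colores agrupar_y_normalizar_colores_alt
  have key := pvFold_sim u cs [] PySem.Dict.empty PySem.Dict.empty (pvInv_empty u)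
  simp only [List.map_nil] at key
  simp only [key, List.map_map]
  exact (List.map_congr_left fun g _ => (pvFinal_eq g)).symm
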